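-- pv_equiv track=rewrite | github.com/limkeunhyeok/daily-coding | 백준/1158/solution.py | solution
-- ===== SOURCE A (Python) =====
-- def solution(n, k):
--     arr = [i for i in range(1, n + 1)]
--     answer = []
--     temp = 0
--     while arr:
--         temp = (temp + k - 1) % len(arr)
--         answer.append(arr.pop(temp))
--     return answer
-- ===== SOURCE B (Python) =====
-- def _build(xs):
--     # order-statistics tree: leaf = (alive, value), node = (left_alive_count, left, right)
--     if len(xs) == 1:
--         return (True, xs[0])
--     mid = len(xs) // 2
--     return (mid, _build(xs[:mid]), _build(xs[mid:]))
--
-- def _remove(t, j):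
--     # value of the j-th alive leaf, and the tree with that leaf marked dead
--     if len(t) == 2:
--         return t[1], (False, t[1])
--     lc, l, r = t
--     if j < lc:
--         v, l2 = _remove(l, j)
--         return v, (lc - 1, l2, r)
--     v, r2 = _remove(r, j - lc)
--     return v, (lc, l, r2)
--
-- def solution(n, k):
--     if n <= 0:
--         return []
--     t = _build(list(range(1, n + 1)))
--     answer = []
--     pos = 0
--     rem = n
--     while rem > 0:
--         pos = (pos + k - 1) % rem
--         v, t = _remove(t, pos)
--         answer.append(v)
--         rem -= 1
--     return answer
-- ===== Notes on version B (the rewrite author's own statement) =====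
-- stated objective: alternative
-- what changed: Replaced A's list.pop at a running index (O(n) per round) with order-statistics selection and removal on a count-annotated balanced binary tree built once over 1..n (O(log n) per round), O(n log n) overall.
import Mathlib
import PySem

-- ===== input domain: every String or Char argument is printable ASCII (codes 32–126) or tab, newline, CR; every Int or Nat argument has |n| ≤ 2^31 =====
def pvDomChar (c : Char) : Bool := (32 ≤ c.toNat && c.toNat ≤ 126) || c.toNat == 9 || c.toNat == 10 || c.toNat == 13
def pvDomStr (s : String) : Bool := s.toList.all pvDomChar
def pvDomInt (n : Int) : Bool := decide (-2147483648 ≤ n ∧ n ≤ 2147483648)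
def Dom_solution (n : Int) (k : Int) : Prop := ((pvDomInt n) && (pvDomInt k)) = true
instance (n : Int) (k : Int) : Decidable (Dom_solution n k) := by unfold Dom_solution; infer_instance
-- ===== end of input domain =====

-- B replaces A's O(n^2) list.pop elimination with order statistics on a count-annotated balanced binary tree (O(n log n)); same return value.

-- ===== PORT A =====
-- A: while arr: temp = (temp + k - 1) % len(arr); answer.append(arr.pop(temp))
def solutionLoopA (k : Int) (arr : List Int) (temp : Int) (answer : List Int) : List Int :=
  if h : arr = [] then answer
  else
    let t := PySem.Int.mod (temp + k - 1) (arr.length : Int)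
    match hp : PySem.List.pop? arr t with
    | none => answer
    | some (x, rest) => solutionLoopA k rest t (answer ++ [x])
termination_by arr.length
decreasing_by
  have := PySem.List.length_of_pop?_eq_some _ hp; simp at this; omega

def solution (n : Int) (k : Int) : List Int :=
  solutionLoopA k (PySem.List.pyRange 1 (n + 1) 1) 0 []

-- ===== PORT B =====
-- B: order-statistics tree; leaf = (alive, value), node = (left_alive_count, left, right).
-- buildT/solutionLoopB carry a fuel parameter only to make the recursion total:
-- solution_alt supplies enough fuel for every call the Python makes.
inductive JTree where
  | leaf : Bool → Int → JTree
  | node : Int → JTree → JTree → JTree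
deriving Repr

def buildT (fuel : Nat) (xs : List Int) : JTree :=
  match fuel with
  | 0 => .leaf false 0
  | fuel + 1 =>
    if (xs.length : Int) = 1 then
      match PySem.List.pyGet? xs 0 with
      | some v => .leaf true v
      | none => .leaf false 0
    else
      let mid := PySem.Int.floordiv (xs.length : Int) 2
      .node mid (buildT fuel (PySem.List.slice xs none (some mid)))
            (buildT fuel (PySem.List.slice xs (some mid) none))

def JTree.remove : JTree → Int → Int × JTree
  | .leaf _ v, _ => (v, .leaf false v)
  | .node lc l r, j =>
    if j < lc then
      let p := l.remove j
      (p.1, .node (lc - 1) p.2 r)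
    else
      let p := r.remove (j - lc)
      (p.1, .node lc l p.2)

def solutionLoopB (k : Int) (fuel : Nat) (t : JTree) (pos : Int) (rem : Int) (answer : List Int) : List Int :=
  match fuel with
  | 0 => answer
  | fuel + 1 =>
    if rem > 0 then
      let pos' := PySem.Int.mod (pos + k - 1) rem
      let p := t.remove pos'
      solutionLoopB k fuel p.2 pos' (rem - 1) (answer ++ [p.1])
    else answer

def solution_alt (n : Int) (k : Int) : List Int :=
  if n ≤ 0 then []
  else
    solutionLoopB k n.toNat
      (buildT (PySem.List.pyRange 1 (n + 1) 1).length (PySem.List.pyRange 1 (n + 1) 1)) 0 n []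

-- ===== PRECONDITION & SPEC =====
def Spec_solution (n : Int) (k : Int) (out : List Int) : Prop := out = solution_alt n k
instance (n : Int) (k : Int) (out : List Int) : Decidable (Spec_solution n k out) := by unfold Spec_solution; infer_instance

-- ===== CLAIM (what is proved, stated in full; the proofs are below) =====
def Claim_equal_solution : Prop := ∀ (n : Int) (k : Int), Dom_solution n k → Spec_solution n k (solution n k)

-- ===== LEMMAS AND PROOFS =====

-- helpers for the proof
def JTList : JTree → List Int
  | .leaf a v => if a then [v] else []
  | .node _ l r => JTList l ++ JTList r

def JTInv : JTree → Prop
  | .leaf _ _ => True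
  | .node lc l r => lc = ((JTList l).length : Int) ∧ JTInv l ∧ JTInv r

theorem remove_spec (t : JTree) (j : Int) (hInv : JTInv t) (h0 : 0 ≤ j)
    (hj : j < ((JTList t).length : Int)) :
    (t.remove j).1 = (JTList t).getD j.toNat 0
    ∧ JTList (t.remove j).2 = (JTList t).eraseIdx j.toNat
    ∧ JTInv (t.remove j).2 := by
  induction t generalizing j with
  | leaf a v =>
    cases a with
    | false => simp [JTList] at hj; omega
    | true =>
      simp [JTList] at hj
      have hj0 : j = 0 := by omega
      subst hj0
      simp [JTree.remove, JTList, JTInv]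
  | node lc l r ihl ihr =>
    obtain ⟨hc, hl, hr⟩ := hInv
    simp only [JTList, List.length_append] at hj
    push_cast at hj
    by_cases hcmp : j < lc
    · have hjl : j.toNat < (JTList l).length := by omega
      obtain ⟨h1, h2, h3⟩ := ihl j hl h0 (by omega)
      refine ⟨?_, ?_, ?_⟩
      · simp only [JTree.remove, if_pos hcmp, JTList]
        rw [h1, List.getD_eq_getElem _ _ hjl,
          List.getD_eq_getElem _ _ (by simp; omega)]
        exact (List.getElem_append_left hjl).symm
      · simp only [JTree.remove, if_pos hcmp, JTList]
        rw [h2, List.eraseIdx_append_of_lt_length hjl]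
      · simp only [JTree.remove, if_pos hcmp, JTInv]
        refine ⟨?_, h3, hr⟩
        rw [h2, List.length_eraseIdx_of_lt hjl]
        omega
    · have h0' : 0 ≤ j - lc := by omega
      have hj' : j - lc < ((JTList r).length : Int) := by omega
      have hjge : (JTList l).length ≤ j.toNat := by omega
      have hjn : (j - lc).toNat = j.toNat - (JTList l).length := by omega
      have hjr : j.toNat - (JTList l).length < (JTList r).length := by omega
      obtain ⟨h1, h2, h3⟩ := ihr (j - lc) hr h0' hj'
      refine ⟨?_, ?_, ?_⟩
      · simp only [JTree.remove, if_neg hcmp, JTList]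
        rw [h1, hjn, List.getD_eq_getElem _ _ hjr,
          List.getD_eq_getElem _ _ (by simp; omega)]
        exact (List.getElem_append_right hjge).symm
      · simp only [JTree.remove, if_neg hcmp, JTList]
        rw [h2, hjn, List.eraseIdx_append_of_length_le hjge]
      · simp only [JTree.remove, if_neg hcmp, JTInv]
        exact ⟨hc, hl, h3⟩

theorem build_spec : ∀ (fuel : Nat) (xs : List Int), xs ≠ [] → xs.length ≤ fuel →
    JTList (buildT fuel xs) = xs ∧ JTInv (buildT fuel xs) := by
  intro fuel
  induction fuel with
  | zero =>
    intro xs hne hlen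
    exact absurd (List.eq_nil_of_length_eq_zero (Nat.le_zero.mp hlen)) hne
  | succ fuel ih =>
    intro xs hne hlen
    by_cases h1 : (xs.length : Int) = 1
    · have hx : ∃ x, xs = [x] := List.length_eq_one_iff.mp (by exact_mod_cast h1)
      obtain ⟨x, hx⟩ := hx
      subst hx
      have hget : PySem.List.pyGet? [x] 0 = some x := by
        have hg := PySem.List.pyGet?_natCast [x] 0
        simpa using hg
      rw [buildT, if_pos h1, hget]
      simp [JTList, JTInv]
    · have hlen2 : 2 ≤ xs.length := by
        have : xs.length ≠ 0 := fun hc => hne (List.eq_nil_of_length_eq_zero hc)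
        have : xs.length ≠ 1 := fun hc => h1 (by rw [hc]; rfl)
        omega
      have hmid : PySem.Int.floordiv ((xs.length : Nat) : Int) 2 = ((xs.length / 2 : Nat) : Int) := by
        rw [PySem.Int.floordiv_eq_ediv_of_pos (by norm_num)]
        omega
      have hm1 : 1 ≤ xs.length / 2 := by omega
      have hm2 : xs.length / 2 < xs.length := by omega
      rw [buildT, if_neg h1]
      simp only [hmid]
      rw [PySem.List.slice_to _ (by positivity), PySem.List.slice_from _ (by positivity)]
      simp only [Int.toNat_natCast]
      have htake : (List.take (xs.length / 2) xs).length = xs.length / 2 := by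
        simp; omega
      have hdrop : (List.drop (xs.length / 2) xs).length = xs.length - xs.length / 2 := by
        simp
      obtain ⟨ihta, ihtb⟩ := ih (List.take (xs.length / 2) xs)
        (by intro hc; rw [hc] at htake; simp at htake; omega) (by omega)
      obtain ⟨ihda, ihdb⟩ := ih (List.drop (xs.length / 2) xs)
        (by intro hc; rw [hc] at hdrop; simp at hdrop; omega) (by omega)
      refine ⟨?_, ?_⟩
      · simp only [JTList, ihta, ihda]
        exact List.take_append_drop _ xs
      · refine ⟨?_, ihtb, ihdb⟩
        rw [ihta, htake]

theorem loopAB (k : Int) : ∀ (fuel : Nat) (arr : List Int) (t : JTree) (pos : Int) (answer : List Int),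
    JTInv t → JTList t = arr → arr.length ≤ fuel →
    solutionLoopA k arr pos answer
      = solutionLoopB k fuel t pos ((arr.length : Nat) : Int) answer := by
  intro fuel
  induction fuel with
  | zero =>
    intro arr t pos answer _ _ hlen
    have h : arr = [] := List.eq_nil_of_length_eq_zero (Nat.le_zero.mp hlen)
    subst h
    rw [solutionLoopA, solutionLoopB]
    simp
  | succ fuel ih =>
    intro arr t pos answer hInv hlist hlen
    by_cases h : arr = []
    · subst h
      rw [solutionLoopA, solutionLoopB]
      simp
    · have hl : 0 < arr.length := List.length_pos_of_ne_nil h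
      have hlz : (0:Int) < (arr.length : Int) := by exact_mod_cast hl
      set j := PySem.Int.mod (pos + k - 1) (arr.length : Int) with hjdef
      have hj0 : 0 ≤ j := PySem.Int.mod_nonneg _ hlz
      have hjl : j < (arr.length : Int) := PySem.Int.mod_lt _ hlz
      have hjn : j.toNat < arr.length := by omega
      have hjcast : j = ((j.toNat : Nat) : Int) := (Int.toNat_of_nonneg hj0).symm
      -- unfold A one step
      rw [solutionLoopA, dif_neg h]
      have hpop : PySem.List.pop? arr (PySem.Int.mod (pos + k - 1) (arr.length : Int))
          = some (arr[j.toNat], arr.eraseIdx j.toNat) := by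
        rw [← hjdef]
        conv_lhs => rw [hjcast]
        exact PySem.List.pop?_natCast arr j.toNat hjn
      simp only []
      split
      · next heq =>
        rw [hpop] at heq
        exact absurd heq (by simp)
      · next x rest heq =>
        rw [hpop] at heq
        simp only [Option.some.injEq, Prod.mk.injEq] at heq
        obtain ⟨hx, hrest⟩ := heq
        subst hx hrest
        -- unfold B one step
        rw [solutionLoopB]
        rw [if_pos hlz]
        simp only []
        obtain ⟨r1, r2, r3⟩ := remove_spec t j hInv hj0 (by rw [hlist]; exact hjl)
        have hv : (t.remove j).1 = arr[j.toNat] := by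
          rw [r1, hlist, List.getD_eq_getElem _ _ hjn]
        have ht2 : JTList (t.remove j).2 = arr.eraseIdx j.toNat := by
          rw [r2, hlist]
        rw [hv, ← hjdef]
        have hrem : ((arr.length : Nat) : Int) - 1 = (((arr.eraseIdx j.toNat).length : Nat) : Int) := by
          rw [List.length_eraseIdx_of_lt hjn]
          push_cast
          omega
        rw [hrem]
        exact ih (arr.eraseIdx j.toNat) (t.remove j).2 j (answer ++ [arr[j.toNat]]) r3 ht2
          (by rw [List.length_eraseIdx_of_lt hjn]; omega)

-- ===== VERDICT (by name: the statement is the Claim_ definition above) =====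
theorem solution_spec : Claim_equal_solution := by
  intro n k _
  unfold Spec_solution solution solution_alt
  by_cases hn : n ≤ 0
  · rw [if_pos hn]
    rw [PySem.List.pyRange_one_eq_nil (by omega)]
    rw [solutionLoopA]
    simp
  · rw [if_neg hn]
    have hlen : (PySem.List.pyRange 1 (n + 1) 1).length = n.toNat := by
      rw [PySem.List.length_pyRange_one]
      omega
    have hne : PySem.List.pyRange 1 (n + 1) 1 ≠ [] := by
      intro hc
      rw [hc] at hlen
      simp at hlen
      omega
    obtain ⟨hb1, hb2⟩ := build_spec (PySem.List.pyRange 1 (n + 1) 1).length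
      (PySem.List.pyRange 1 (n + 1) 1) hne le_rfl
    have heq := loopAB k n.toNat _ _ 0 [] hb2 hb1 (by omega)
    have hcast : (((PySem.List.pyRange 1 (n + 1) 1).length : Nat) : Int) = n := by
      rw [hlen]; omega
    rw [hcast] at heq
    exact heq
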